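-- pv_equiv track=rewrite | github.com/martinlyra/advent-of-code-2023 | day_13_2.py | desmudged
-- ===== SOURCE A (Python) =====
-- import copy
--
-- def desmudged(pattern) -> list[list[list[str]]]:
--     def _desmudge(pattern, i, j):
--         p = copy.deepcopy(pattern)
--         p[i][j] = "." if p[i][j] == "#" else "#"
--         return p
--
--     return [
--         _desmudge(pattern, i, j)
--         for i in range(len(pattern))
--         for j in range(len(pattern[0]))
--     ]
-- ===== SOURCE B (Python) =====
-- def desmudged(pattern) -> list[list[list[str]]]:
--     # Pure structural recursion (a zipper-free cons decomposition): no indices,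
--     # no copies, no mutation. row_variants gives all one-flip variants of the
--     # first c cells of a row; go combines them row by row.
--     def row_variants(row, c):
--         if c == 0:
--             return []
--         head, tail = row[0], row[1:]
--         flipped = "." if head == "#" else "#"
--         return [[flipped] + tail] + [[head] + v for v in row_variants(tail, c - 1)]
--
--     def go(rows, c):
--         if not rows:
--             return []
--         first, rest = rows[0], rows[1:]
--         return [[rv] + rest for rv in row_variants(first, c)] \
--              + [[first] + g for g in go(rest, c)]
--
--     return go(pattern, len(pattern[0]) if pattern else 0)
-- ===== Notes on version B (the rewrite author's own statement) =====
-- stated objective: alternative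
-- what changed: Replaces index-driven enumeration with per-variant deepcopy+mutation by pure structural recursion: a row helper produces all one-flip variants of a row by consing, and a grid helper combines row variants with unchanged suffixes; no indices, copies or mutation.
import Mathlib
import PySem

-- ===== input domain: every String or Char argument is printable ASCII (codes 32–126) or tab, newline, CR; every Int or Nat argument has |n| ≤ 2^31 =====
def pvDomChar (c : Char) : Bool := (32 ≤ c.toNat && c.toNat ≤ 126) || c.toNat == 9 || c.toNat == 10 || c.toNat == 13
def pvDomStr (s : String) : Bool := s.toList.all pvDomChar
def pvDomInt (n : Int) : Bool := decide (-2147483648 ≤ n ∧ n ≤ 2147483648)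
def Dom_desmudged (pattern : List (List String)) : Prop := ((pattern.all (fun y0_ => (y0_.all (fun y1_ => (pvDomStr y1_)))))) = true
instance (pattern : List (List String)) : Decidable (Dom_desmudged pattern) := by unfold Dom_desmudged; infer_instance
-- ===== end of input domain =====

-- B replaces A's index loops with deepcopy+mutate by pure structural recursion over rows and cells (objective: alternative).
-- ===== PORT A =====
-- _desmudge(pattern, i, j): deepcopy is the identity on the value; p[i][j] = flip(p[i][j]).
-- list indexing/assignment ported with getD/set (in range on Pre_; out of range Python raises).
def pvDesmudgeOne (pattern : List (List String)) (i j : Nat) : List (List String) :=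
  pattern.set i ((pattern.getD i []).set j
    (if (pattern.getD i []).getD j "" == "#" then "." else "#"))

def desmudged (pattern : List (List String)) : List (List (List String)) :=
  -- [ _desmudge(pattern, i, j) for i in range(len(pattern)) for j in range(len(pattern[0])) ]
  (List.range pattern.length).flatMap (fun i =>
    (List.range (pattern.headD []).length).map (fun j => pvDesmudgeOne pattern i j))

-- ===== PORT B =====
-- row_variants(row, c): all one-flip variants of the first c cells, by consing.
def pvRowVariants : List String → Nat → List (List String)
  | _, 0 => []
  | [], _ + 1 => []   -- Python raises here (row too short); excluded by Pre_
  | h :: t, c + 1 =>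
      ((if h == "#" then "." else "#") :: t) ::
        (pvRowVariants t c).map (fun v => h :: v)

-- go(rows, c): variants touching the first row, then variants of the rest.
def pvGo : List (List String) → Nat → List (List (List String))
  | [], _ => []
  | first :: rest, c =>
      (pvRowVariants first c).map (fun rv => rv :: rest) ++
        (pvGo rest c).map (fun g => first :: g)

def desmudged_alt (pattern : List (List String)) : List (List (List String)) :=
  pvGo pattern (pattern.headD []).length

-- ===== PRECONDITION & SPEC =====
-- Pre_ excludes exactly the inputs where Python A raises IndexError:
-- nonempty patterns having a row shorter than row 0 (the p[i][j] assignment).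
def Pre_desmudged (pattern : List (List String)) : Prop :=
  ∀ row ∈ pattern, (pattern.headD []).length ≤ row.length
instance (pattern : List (List String)) : Decidable (Pre_desmudged pattern) := by
  unfold Pre_desmudged; infer_instance
def pvWitness_desmudged : List (List String) := [["#", "."], [".", "#"]]

def Spec_desmudged (pattern : List (List String)) (out : List (List (List String))) : Prop := out = desmudged_alt pattern
instance (pattern : List (List String)) (out : List (List (List String))) : Decidable (Spec_desmudged pattern out) := by unfold Spec_desmudged; infer_instance

-- ===== CLAIM (what is proved, stated in full; the proofs are below) =====
def Claim_equal_desmudged : Prop := ∀ (pattern : List (List String)), Dom_desmudged pattern → Pre_desmudged pattern → Spec_desmudged pattern (desmudged pattern)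

-- ===== LEMMAS AND PROOFS =====

-- B's row recursion computes A's set-at-index variant for each j < c.
theorem pvRowVariants_eq (row : List String) : ∀ c : Nat, c ≤ row.length →
    pvRowVariants row c =
      (List.range c).map (fun j =>
        row.set j (if row.getD j "" == "#" then "." else "#")) := by
  induction row with
  | nil =>
    intro c hc
    obtain rfl : c = 0 := by simpa using hc
    simp [pvRowVariants]
  | cons h t ih =>
    intro c hc
    cases c with
    | zero => simp [pvRowVariants]
    | succ c =>
      rw [List.range_succ_eq_map]
      simp only [List.map_cons, List.map_map]
      rw [pvRowVariants, ih c (by simpa using hc)]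
      refine List.cons_eq_cons.mpr ⟨rfl, ?_⟩
      rw [List.map_map]
      apply List.map_congr_left
      intro j _
      simp [Function.comp]

-- B's grid recursion computes A's flatMap of set-at-index variants.
theorem pvGo_eq (rows : List (List String)) : ∀ c : Nat,
    (∀ row ∈ rows, c ≤ row.length) →
    pvGo rows c =
      (List.range rows.length).flatMap (fun i =>
        (List.range c).map (fun j => pvDesmudgeOne rows i j)) := by
  induction rows with
  | nil => intro c _; simp [pvGo]
  | cons r rest ih =>
    intro c hc
    rw [pvGo, List.length_cons, List.range_succ_eq_map]
    simp only [List.flatMap_cons, List.flatMap_map]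
    have h0 : (List.range c).map (fun j => pvDesmudgeOne (r :: rest) 0 j) =
        (pvRowVariants r c).map (fun rv => rv :: rest) := by
      rw [pvRowVariants_eq r c (hc r (by simp)), List.map_map]
      apply List.map_congr_left
      intro j _
      simp [pvDesmudgeOne, Function.comp]
    have h1 : (List.range rest.length).flatMap
        (fun i => (List.range c).map (fun j => pvDesmudgeOne (r :: rest) (i + 1) j)) =
        (pvGo rest c).map (fun g => r :: g) := by
      rw [ih c (fun row hrow => hc row (by simp [hrow]))]
      rw [List.map_flatMap]
      apply List.flatMap_congr
      intro i _
      rw [List.map_map]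
      apply List.map_congr_left
      intro j _
      simp [pvDesmudgeOne, Function.comp]
    rw [h0, h1]

-- ===== VERDICT (by name: the statement is the Claim_ definition above) =====
theorem desmudged_spec : Claim_equal_desmudged := by
  intro pattern _ hpre
  unfold Spec_desmudged desmudged desmudged_alt
  exact (pvGo_eq pattern (pattern.headD []).length hpre).symm
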